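-- pv_equiv track=rewrite | github.com/elisseeff-space/deriva | deriva/modules/analysis/stability_analysis.py | extract_element_type
-- ===== SOURCE A (Python) =====
-- def extract_element_type(element_id: str) -> str:
--     """
--     Extract element type from element identifier.
--
--     Common patterns:
--     - "ac_component_name" -> "ApplicationComponent" (ac_ prefix)
--     - "bp_process_name" -> "BusinessProcess" (bp_ prefix)
--     - "do_data_name" -> "DataObject" (do_ prefix)
--
--     Args:
--         element_id: Element identifier string
--
--     Returns:
--         Element type name or "Unknown"
--     """
--     prefix_map = {
--         "ac_": "ApplicationComponent",
--         "ai_": "ApplicationInterface",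
--         "as_": "ApplicationService",
--         "af_": "ApplicationFunction",
--         "ap_": "ApplicationProcess",
--         "do_": "DataObject",
--         "ba_": "BusinessActor",
--         "br_": "BusinessRole",
--         "bp_": "BusinessProcess",
--         "bf_": "BusinessFunction",
--         "bs_": "BusinessService",
--         "bo_": "BusinessObject",
--         "be_": "BusinessEvent",
--         "ts_": "TechnologyService",
--         "ti_": "TechnologyInterface",
--         "tf_": "TechnologyFunction",
--         "nd_": "Node",
--         "dv_": "Device",
--         "ss_": "SystemSoftware",
--         "ar_": "Artifact",
--         "techsvc_": "TechnologyService",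
--         "bus_obj_": "BusinessObject",
--         "bus_proc_": "BusinessProcess",
--         "app_comp_": "ApplicationComponent",
--         "data_obj_": "DataObject",
--     }
--
--     element_lower = element_id.lower()
--     for prefix, elem_type in prefix_map.items():
--         if element_lower.startswith(prefix):
--             return elem_type
--
--     # Try to infer from camelCase/PascalCase patterns
--     if "_" in element_id:
--         parts = element_id.split("_")
--         if len(parts) >= 2:
--             # Check first two parts for known abbreviations
--             abbrev = "_".join(parts[:2]).lower() + "_"
--             if abbrev in prefix_map:
--                 return prefix_map[abbrev]
--
--     return "Unknown"
-- ===== SOURCE B (Python) =====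
-- _PREFIX_MAP = {
--     "ac_": "ApplicationComponent",
--     "ai_": "ApplicationInterface",
--     "as_": "ApplicationService",
--     "af_": "ApplicationFunction",
--     "ap_": "ApplicationProcess",
--     "do_": "DataObject",
--     "ba_": "BusinessActor",
--     "br_": "BusinessRole",
--     "bp_": "BusinessProcess",
--     "bf_": "BusinessFunction",
--     "bs_": "BusinessService",
--     "bo_": "BusinessObject",
--     "be_": "BusinessEvent",
--     "ts_": "TechnologyService",
--     "ti_": "TechnologyInterface",
--     "tf_": "TechnologyFunction",
--     "nd_": "Node",
--     "dv_": "Device",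
--     "ss_": "SystemSoftware",
--     "ar_": "Artifact",
--     "techsvc_": "TechnologyService",
--     "bus_obj_": "BusinessObject",
--     "bus_proc_": "BusinessProcess",
--     "app_comp_": "ApplicationComponent",
--     "data_obj_": "DataObject",
-- }
--
--
-- def extract_element_type(element_id: str) -> str:
--     # Index the input instead of scanning the map: derive the only two
--     # candidate keys from the id's own first one or two '_'-separated parts
--     # and look them up directly.
--     s = element_id.lower()
--     if "_" not in s:
--         return "Unknown"
--     parts = s.split("_")
--     hit = _PREFIX_MAP.get(parts[0] + "_")
--     if hit is None:
--         hit = _PREFIX_MAP.get(parts[0] + "_" + parts[1] + "_")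
--     return hit if hit is not None else "Unknown"
-- ===== Notes on version B (the rewrite author's own statement) =====
-- stated objective: simpler
-- what changed: Instead of scanning all 25 map entries with startswith and then a separate camelCase fallback join-and-lookup, B derives the only two possible candidate keys (first part + '_', first two parts + '_') from the input's own split and looks each up directly in the dict, unifying scan and fallback into two O(1) lookups.
import Mathlib
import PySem

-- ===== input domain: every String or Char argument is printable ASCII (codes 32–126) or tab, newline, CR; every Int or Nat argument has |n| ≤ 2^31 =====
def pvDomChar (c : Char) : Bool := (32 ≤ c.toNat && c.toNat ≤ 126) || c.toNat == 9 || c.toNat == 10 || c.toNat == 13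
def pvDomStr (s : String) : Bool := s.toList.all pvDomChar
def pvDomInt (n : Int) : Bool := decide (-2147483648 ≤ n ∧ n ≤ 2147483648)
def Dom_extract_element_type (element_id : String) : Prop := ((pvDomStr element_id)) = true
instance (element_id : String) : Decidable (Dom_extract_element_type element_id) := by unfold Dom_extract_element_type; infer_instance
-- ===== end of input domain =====

-- B replaces A's 25-entry startswith scan plus separate camelCase join-and-lookup fallback by two
-- direct dict lookups of candidate keys derived from the input's own first one or two '_'-parts (simpler).

-- ===== PORT A =====
def pvPrefixPairs : List (String × String) :=
  [("ac_", "ApplicationComponent"), ("ai_", "ApplicationInterface"), ("as_", "ApplicationService"),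
   ("af_", "ApplicationFunction"), ("ap_", "ApplicationProcess"), ("do_", "DataObject"),
   ("ba_", "BusinessActor"), ("br_", "BusinessRole"), ("bp_", "BusinessProcess"),
   ("bf_", "BusinessFunction"), ("bs_", "BusinessService"), ("bo_", "BusinessObject"),
   ("be_", "BusinessEvent"), ("ts_", "TechnologyService"), ("ti_", "TechnologyInterface"),
   ("tf_", "TechnologyFunction"), ("nd_", "Node"), ("dv_", "Device"),
   ("ss_", "SystemSoftware"), ("ar_", "Artifact"), ("techsvc_", "TechnologyService"),
   ("bus_obj_", "BusinessObject"), ("bus_proc_", "BusinessProcess"),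
   ("app_comp_", "ApplicationComponent"), ("data_obj_", "DataObject")]

def pvPrefixMap : PySem.Dict String String := PySem.Dict.ofList pvPrefixPairs

-- the 'for prefix, elem_type in prefix_map.items(): if element_lower.startswith(prefix): return elem_type' loop
def pvScan : List (String × String) → String → Option String
  | [], _ => none
  | (p, ty) :: rest, el => if PySem.Str.startswith el p then some ty else pvScan rest el

def extract_element_type (element_id : String) : String :=
  let element_lower := PySem.Str.lower element_id
  match pvScan pvPrefixMap.items element_lower with
  | some ty => ty
  | none =>
    if PySem.Str.isIn "_" element_id then
      match PySem.Str.split? element_id "_" with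
      | some parts =>
        if 2 ≤ parts.length then
          match pvPrefixMap.get? (PySem.Str.lower (PySem.Str.join "_" (PySem.List.slice parts none (some 2))) ++ "_") with
          | some ty => ty
          | none => "Unknown"
        else "Unknown"
      | none => "Unknown"   -- unreachable: the separator "_" is nonempty, split? never returns none
    else "Unknown"

-- ===== PORT B =====
def extract_element_type_alt (element_id : String) : String :=
  let s := PySem.Str.lower element_id
  if PySem.Str.isIn "_" s then
    match PySem.Str.split? s "_" with
    | some (p0 :: p1 :: _) =>
      match pvPrefixMap.get? (p0 ++ "_") with
      | some ty => ty
      | none =>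
        match pvPrefixMap.get? (p0 ++ "_" ++ p1 ++ "_") with
        | some ty => ty
        | none => "Unknown"
    | _ => "Unknown"   -- unreachable totality guard: '_' ∈ s gives split? = some with ≥ 2 parts
  else "Unknown"

-- ===== PRECONDITION & SPEC =====
def Spec_extract_element_type (element_id : String) (out : String) : Prop := out = extract_element_type_alt element_id
instance (element_id : String) (out : String) : Decidable (Spec_extract_element_type element_id out) := by unfold Spec_extract_element_type; infer_instance

-- ===== CLAIM (what is proved, stated in full; the proofs are below) =====
def Claim_equal_extract_element_type : Prop := ∀ (element_id : String), Dom_extract_element_type element_id → Spec_extract_element_type element_id (extract_element_type element_id)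

-- ===== LEMMAS AND PROOFS =====

theorem pv_str_beq (s t : String) : (s == t) = (s.toList == t.toList) := by
  rw [Bool.eq_iff_iff]; simp [String.ext_iff]

theorem pv_items_eq : pvPrefixMap.items = pvPrefixPairs := by decide

-- Chars.splitOn with separator "_" is List.splitOn '_'
theorem pv_go_eq (fuel : Nat) (l cur : List Char) (acc : List (List Char)) (h : l.length < fuel) :
    PySem.Chars.splitOn.go ['_'] fuel l cur acc
      = acc.reverse ++ (List.splitOn '_' l).modifyHead (cur.reverse ++ ·) := by
  induction fuel generalizing l cur acc with
  | zero => omega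
  | succ fuel ih =>
    cases l with
    | nil =>
      simp [PySem.Chars.splitOn.go, List.splitOn, List.splitOnP_nil]
    | cons c rest =>
      rw [PySem.Chars.splitOn.go]
      by_cases hc : c = '_'
      · subst hc
        have hpre : (['_'] : List Char).isPrefixOf ('_' :: rest) = true := by simp [List.isPrefixOf]
        rw [if_pos hpre]
        simp only [List.length_singleton, List.drop_succ_cons, List.drop_zero]
        rw [ih rest [] (cur.reverse :: acc) (by simp at h ⊢; omega)]
        cases hsp : List.splitOn '_' rest with
        | nil => exact absurd hsp (List.splitOnP_ne_nil _ _)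
        | cons a t =>
          rw [List.splitOn, List.splitOnP_cons, if_pos (by simp)]
          rw [List.splitOn] at hsp
          rw [hsp]
          simp
      · have hpre : (['_'] : List Char).isPrefixOf (c :: rest) = false := by
          simp [List.isPrefixOf]
          exact fun e => hc e.symm
        rw [if_neg (by simp [hpre])]
        rw [ih rest (c :: cur) acc (by simp at h ⊢; omega)]
        cases hsp : List.splitOn '_' rest with
        | nil => exact absurd hsp (List.splitOnP_ne_nil _ _)
        | cons a t =>
          rw [List.splitOn, List.splitOnP_cons, if_neg (by simp; exact hc)]
          rw [List.splitOn] at hsp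
          rw [hsp]
          simp

theorem pv_splitOn_eq (cs : List Char) : PySem.Chars.splitOn cs ['_'] = List.splitOn '_' cs := by
  rw [PySem.Chars.splitOn, pv_go_eq _ _ _ _ (by omega)]
  cases hsp : List.splitOn '_' cs with
  | nil => exact absurd hsp (List.splitOnP_ne_nil _ _)
  | cons a t => simp

theorem pv_split?_underscore (s : String) :
    PySem.Str.split? s "_" = some ((List.splitOn '_' s.toList).map String.ofList) := by
  rw [PySem.Str.split?]
  have h1 : ("_" : String).toList = ['_'] := rfl
  rw [h1, PySem.Chars.split?]
  rw [if_neg (by simp)]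
  rw [pv_splitOn_eq]
  rfl

theorem pv_sp_no {r : List Char} (h : '_' ∉ r) : List.splitOn '_' r = [r] := by
  induction r with
  | nil => rfl
  | cons a tl ih =>
    simp at h
    rw [List.splitOn, List.splitOnP_cons, if_neg (by simp; exact fun e => h.1 e.symm)]
    have := ih h.2
    rw [List.splitOn] at this
    rw [this]
    rfl

theorem pv_sp_delim {w : List Char} (r : List Char) (h : '_' ∉ w) :
    List.splitOn '_' (w ++ '_' :: r) = w :: List.splitOn '_' r := by
  induction w with
  | nil =>
    rw [List.nil_append, List.splitOn, List.splitOnP_cons, if_pos (by simp)]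
    rfl
  | cons a tl ih =>
    simp at h
    rw [List.cons_append, List.splitOn, List.splitOnP_cons, if_neg (by simp; exact fun e => h.1 e.symm)]
    have := ih h.2
    rw [List.splitOn] at this
    rw [this]
    rfl

theorem pv_mem_decomp {cs : List Char} (h : '_' ∈ cs) :
    ∃ w r, cs = w ++ '_' :: r ∧ '_' ∉ w := by
  induction cs with
  | nil => simp at h
  | cons a tl ih =>
    by_cases ha : a = '_'
    · exact ⟨[], tl, by simp [ha], by simp⟩
    · rcases List.mem_cons.mp h with h' | h'
      · exact absurd h'.symm ha
      · obtain ⟨w, r, rfl, hw⟩ := ih h'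
        exact ⟨a :: w, r, rfl, by simp [hw]; exact fun e => ha e.symm⟩

theorem pv_lowerChar_eq_underscore (c : Char) : (PySem.Chars.lowerChar c = '_') ↔ c = '_' := by
  unfold PySem.Chars.lowerChar PySem.Chars.isupper
  split_ifs with h
  · simp at h
    constructor
    · intro he
      exfalso
      have h1 : 65 ≤ c.toNat := h.1
      have h2 : c.toNat ≤ 90 := h.2
      have hv : Nat.isValidChar (c.toNat + 32) := Or.inl (by omega)
      have : (Char.ofNat (c.toNat + 32)).toNat = c.toNat + 32 := by
        rw [Char.toNat_ofNat]; simp [hv]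
      rw [he] at this
      have : (95 : Nat) = c.toNat + 32 := this
      omega
    · intro hc; subst hc; exfalso; revert h; decide
  · rfl

theorem pv_mem_lower (x : List Char) : ('_' ∈ PySem.Chars.lower x) ↔ '_' ∈ x := by
  simp only [PySem.Chars.lower, List.mem_map]
  constructor
  · rintro ⟨c, hc, he⟩
    rwa [(pv_lowerChar_eq_underscore c).mp he] at hc
  · intro hx; exact ⟨'_', hx, rfl⟩

theorem pv_isIn_underscore (x : List Char) : PySem.Chars.isIn ['_'] x = decide ('_' ∈ x) := by
  rw [Bool.eq_iff_iff, PySem.Chars.isIn_iff_infix]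
  simp only [decide_eq_true_eq]
  constructor
  · intro hin
    exact hin.sublist.subset (by simp : '_' ∈ ['_'])
  · intro hc
    obtain ⟨s', t', rfl⟩ := List.mem_iff_append.mp hc
    exact ⟨s', t', by simp⟩

theorem pv_lower_append (x y : List Char) :
    PySem.Chars.lower (x ++ y) = PySem.Chars.lower x ++ PySem.Chars.lower y := by
  simp [PySem.Chars.lower]

theorem pv_lower_cons (a : Char) (x : List Char) :
    PySem.Chars.lower (a :: x) = PySem.Chars.lowerChar a :: PySem.Chars.lower x := rfl

theorem pv_join_pair (s a b : List Char) : PySem.Chars.join s [a, b] = a ++ s ++ b := by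
  simp [PySem.Chars.join, List.intercalate, List.intersperse]

theorem pv_delim_inj {w k x y : List Char} (hw : '_' ∉ w) (hk : '_' ∉ k) :
    w ++ '_' :: x = k ++ '_' :: y ↔ w = k ∧ x = y := by
  constructor
  · intro h
    induction w generalizing k with
    | nil =>
      cases k with
      | nil => simpa using h
      | cons b k' =>
        simp at h
        exact absurd (by simp [← h.1] : '_' ∈ b :: k') hk
    | cons a w' ih =>
      cases k with
      | nil =>
        simp at h
        exact absurd (by simp [h.1] : '_' ∈ a :: w') hw
      | cons b k' =>
        simp at h
        obtain ⟨h1, h2⟩ := h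
        have := ih (by simp_all) (by simp_all) h2
        exact ⟨by simp [h1, this.1], this.2⟩
  · rintro ⟨rfl, rfl⟩; rfl

theorem pv_sw_single (k w r : List Char) (hk : '_' ∉ k) (hw : '_' ∉ w) :
    PySem.Chars.startswith (w ++ '_' :: r) (k ++ ['_']) = (k == w) := by
  rw [Bool.eq_iff_iff, PySem.Chars.startswith_iff, beq_iff_eq]
  constructor
  · rintro ⟨t, ht⟩
    rw [List.append_assoc, List.singleton_append] at ht
    exact ((pv_delim_inj hk hw).mp ht).1
  · rintro rfl
    exact ⟨r, by simp⟩

theorem pv_sw_double (k1 k2 w r : List Char) (hk : '_' ∉ k1) (hw : '_' ∉ w) :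
    PySem.Chars.startswith (w ++ '_' :: r) (k1 ++ '_' :: k2) = (k1 == w && PySem.Chars.startswith r k2) := by
  rw [Bool.eq_iff_iff, PySem.Chars.startswith_iff]
  simp only [Bool.and_eq_true, beq_iff_eq, PySem.Chars.startswith_iff]
  constructor
  · rintro ⟨t, ht⟩
    rw [List.append_assoc, List.cons_append] at ht
    have := (pv_delim_inj hk hw).mp ht
    exact ⟨this.1, t, this.2⟩
  · rintro ⟨rfl, t, rfl⟩
    exact ⟨t, by simp⟩

theorem pv_sw_no (k r : List Char) (hr : '_' ∉ r) :
    PySem.Chars.startswith r (k ++ ['_']) = false := by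
  rw [Bool.eq_false_iff]
  intro h
  rw [PySem.Chars.startswith_iff] at h
  exact hr (h.subset (by simp))

theorem pv_beq_single (k w : List Char) : ((k ++ ['_']) == (w ++ ['_'])) = (k == w) := by
  rw [Bool.eq_iff_iff, beq_iff_eq, beq_iff_eq]
  simp

theorem pv_beq_double (k1 k2 w w2 : List Char) (hk : '_' ∉ k1) (hw : '_' ∉ w) :
    ((k1 ++ '_' :: (k2 ++ ['_'])) == (w ++ '_' :: (w2 ++ ['_']))) = (k1 == w && k2 == w2) := by
  rw [Bool.eq_iff_iff]
  simp only [Bool.and_eq_true, beq_iff_eq]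
  rw [pv_delim_inj hk hw]
  simp

theorem pv_cross1 (k w w2 : List Char) (hk : '_' ∉ k) :
    ((k ++ ['_']) == (w ++ '_' :: (w2 ++ ['_']))) = false := by
  rw [Bool.eq_false_iff]
  simp only [ne_eq, beq_iff_eq]
  intro h
  have hcnt := congrArg (List.count '_') h
  simp [List.count_append] at hcnt
  rw [List.count_eq_zero_of_not_mem hk] at hcnt
  omega

theorem pv_cross2 (k1 k2 w : List Char) (hw : '_' ∉ w) :
    ((k1 ++ '_' :: (k2 ++ ['_'])) == (w ++ ['_'])) = false := by
  rw [Bool.eq_false_iff]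
  simp only [ne_eq, beq_iff_eq]
  intro h
  have hcnt := congrArg (List.count '_') h
  simp [List.count_append] at hcnt
  rw [List.count_eq_zero_of_not_mem hw] at hcnt
  omega

theorem pv_swno (k r : List Char) (hr : '_' ∉ r) (hk : '_' ∈ k) :
    PySem.Chars.startswith r k = false := by
  rw [Bool.eq_false_iff]
  intro h
  rw [PySem.Chars.startswith_iff] at h
  exact hr (h.sublist.subset hk)

theorem pv_sws_ac (w r : List Char) (hw : '_' ∉ w) :
    PySem.Chars.startswith (w ++ '_' :: r) ['a','c','_'] = (['a','c','_'] == w ++ ['_']) := by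
  have h1 := pv_sw_single ['a','c'] w r (by decide) hw
  have h2 := pv_beq_single ['a','c'] w
  simp only [List.cons_append, List.nil_append] at h1 h2
  rw [h1, ← h2]

theorem pv_crossS_ac (w w2 : List Char) :
    (['a','c','_'] == w ++ '_' :: (w2 ++ ['_'])) = false := by
  have := pv_cross1 ['a','c'] w w2 (by decide)
  simpa only [List.cons_append, List.nil_append] using this

theorem pv_sws_ai (w r : List Char) (hw : '_' ∉ w) :
    PySem.Chars.startswith (w ++ '_' :: r) ['a','i','_'] = (['a','i','_'] == w ++ ['_']) := by
  have h1 := pv_sw_single ['a','i'] w r (by decide) hw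
  have h2 := pv_beq_single ['a','i'] w
  simp only [List.cons_append, List.nil_append] at h1 h2
  rw [h1, ← h2]

theorem pv_crossS_ai (w w2 : List Char) :
    (['a','i','_'] == w ++ '_' :: (w2 ++ ['_'])) = false := by
  have := pv_cross1 ['a','i'] w w2 (by decide)
  simpa only [List.cons_append, List.nil_append] using this

theorem pv_sws_as (w r : List Char) (hw : '_' ∉ w) :
    PySem.Chars.startswith (w ++ '_' :: r) ['a','s','_'] = (['a','s','_'] == w ++ ['_']) := by
  have h1 := pv_sw_single ['a','s'] w r (by decide) hw
  have h2 := pv_beq_single ['a','s'] w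
  simp only [List.cons_append, List.nil_append] at h1 h2
  rw [h1, ← h2]

theorem pv_crossS_as (w w2 : List Char) :
    (['a','s','_'] == w ++ '_' :: (w2 ++ ['_'])) = false := by
  have := pv_cross1 ['a','s'] w w2 (by decide)
  simpa only [List.cons_append, List.nil_append] using this

theorem pv_sws_af (w r : List Char) (hw : '_' ∉ w) :
    PySem.Chars.startswith (w ++ '_' :: r) ['a','f','_'] = (['a','f','_'] == w ++ ['_']) := by
  have h1 := pv_sw_single ['a','f'] w r (by decide) hw
  have h2 := pv_beq_single ['a','f'] w
  simp only [List.cons_append, List.nil_append] at h1 h2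
  rw [h1, ← h2]

theorem pv_crossS_af (w w2 : List Char) :
    (['a','f','_'] == w ++ '_' :: (w2 ++ ['_'])) = false := by
  have := pv_cross1 ['a','f'] w w2 (by decide)
  simpa only [List.cons_append, List.nil_append] using this

theorem pv_sws_ap (w r : List Char) (hw : '_' ∉ w) :
    PySem.Chars.startswith (w ++ '_' :: r) ['a','p','_'] = (['a','p','_'] == w ++ ['_']) := by
  have h1 := pv_sw_single ['a','p'] w r (by decide) hw
  have h2 := pv_beq_single ['a','p'] w
  simp only [List.cons_append, List.nil_append] at h1 h2
  rw [h1, ← h2]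

theorem pv_crossS_ap (w w2 : List Char) :
    (['a','p','_'] == w ++ '_' :: (w2 ++ ['_'])) = false := by
  have := pv_cross1 ['a','p'] w w2 (by decide)
  simpa only [List.cons_append, List.nil_append] using this

theorem pv_sws_do (w r : List Char) (hw : '_' ∉ w) :
    PySem.Chars.startswith (w ++ '_' :: r) ['d','o','_'] = (['d','o','_'] == w ++ ['_']) := by
  have h1 := pv_sw_single ['d','o'] w r (by decide) hw
  have h2 := pv_beq_single ['d','o'] w
  simp only [List.cons_append, List.nil_append] at h1 h2
  rw [h1, ← h2]

theorem pv_crossS_do (w w2 : List Char) :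
    (['d','o','_'] == w ++ '_' :: (w2 ++ ['_'])) = false := by
  have := pv_cross1 ['d','o'] w w2 (by decide)
  simpa only [List.cons_append, List.nil_append] using this

theorem pv_sws_ba (w r : List Char) (hw : '_' ∉ w) :
    PySem.Chars.startswith (w ++ '_' :: r) ['b','a','_'] = (['b','a','_'] == w ++ ['_']) := by
  have h1 := pv_sw_single ['b','a'] w r (by decide) hw
  have h2 := pv_beq_single ['b','a'] w
  simp only [List.cons_append, List.nil_append] at h1 h2
  rw [h1, ← h2]

theorem pv_crossS_ba (w w2 : List Char) :
    (['b','a','_'] == w ++ '_' :: (w2 ++ ['_'])) = false := by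
  have := pv_cross1 ['b','a'] w w2 (by decide)
  simpa only [List.cons_append, List.nil_append] using this

theorem pv_sws_br (w r : List Char) (hw : '_' ∉ w) :
    PySem.Chars.startswith (w ++ '_' :: r) ['b','r','_'] = (['b','r','_'] == w ++ ['_']) := by
  have h1 := pv_sw_single ['b','r'] w r (by decide) hw
  have h2 := pv_beq_single ['b','r'] w
  simp only [List.cons_append, List.nil_append] at h1 h2
  rw [h1, ← h2]

theorem pv_crossS_br (w w2 : List Char) :
    (['b','r','_'] == w ++ '_' :: (w2 ++ ['_'])) = false := by
  have := pv_cross1 ['b','r'] w w2 (by decide)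
  simpa only [List.cons_append, List.nil_append] using this

theorem pv_sws_bp (w r : List Char) (hw : '_' ∉ w) :
    PySem.Chars.startswith (w ++ '_' :: r) ['b','p','_'] = (['b','p','_'] == w ++ ['_']) := by
  have h1 := pv_sw_single ['b','p'] w r (by decide) hw
  have h2 := pv_beq_single ['b','p'] w
  simp only [List.cons_append, List.nil_append] at h1 h2
  rw [h1, ← h2]

theorem pv_crossS_bp (w w2 : List Char) :
    (['b','p','_'] == w ++ '_' :: (w2 ++ ['_'])) = false := by
  have := pv_cross1 ['b','p'] w w2 (by decide)
  simpa only [List.cons_append, List.nil_append] using this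

theorem pv_sws_bf (w r : List Char) (hw : '_' ∉ w) :
    PySem.Chars.startswith (w ++ '_' :: r) ['b','f','_'] = (['b','f','_'] == w ++ ['_']) := by
  have h1 := pv_sw_single ['b','f'] w r (by decide) hw
  have h2 := pv_beq_single ['b','f'] w
  simp only [List.cons_append, List.nil_append] at h1 h2
  rw [h1, ← h2]

theorem pv_crossS_bf (w w2 : List Char) :
    (['b','f','_'] == w ++ '_' :: (w2 ++ ['_'])) = false := by
  have := pv_cross1 ['b','f'] w w2 (by decide)
  simpa only [List.cons_append, List.nil_append] using this

theorem pv_sws_bs (w r : List Char) (hw : '_' ∉ w) :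
    PySem.Chars.startswith (w ++ '_' :: r) ['b','s','_'] = (['b','s','_'] == w ++ ['_']) := by
  have h1 := pv_sw_single ['b','s'] w r (by decide) hw
  have h2 := pv_beq_single ['b','s'] w
  simp only [List.cons_append, List.nil_append] at h1 h2
  rw [h1, ← h2]

theorem pv_crossS_bs (w w2 : List Char) :
    (['b','s','_'] == w ++ '_' :: (w2 ++ ['_'])) = false := by
  have := pv_cross1 ['b','s'] w w2 (by decide)
  simpa only [List.cons_append, List.nil_append] using this

theorem pv_sws_bo (w r : List Char) (hw : '_' ∉ w) :
    PySem.Chars.startswith (w ++ '_' :: r) ['b','o','_'] = (['b','o','_'] == w ++ ['_']) := by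
  have h1 := pv_sw_single ['b','o'] w r (by decide) hw
  have h2 := pv_beq_single ['b','o'] w
  simp only [List.cons_append, List.nil_append] at h1 h2
  rw [h1, ← h2]

theorem pv_crossS_bo (w w2 : List Char) :
    (['b','o','_'] == w ++ '_' :: (w2 ++ ['_'])) = false := by
  have := pv_cross1 ['b','o'] w w2 (by decide)
  simpa only [List.cons_append, List.nil_append] using this

theorem pv_sws_be (w r : List Char) (hw : '_' ∉ w) :
    PySem.Chars.startswith (w ++ '_' :: r) ['b','e','_'] = (['b','e','_'] == w ++ ['_']) := by
  have h1 := pv_sw_single ['b','e'] w r (by decide) hw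
  have h2 := pv_beq_single ['b','e'] w
  simp only [List.cons_append, List.nil_append] at h1 h2
  rw [h1, ← h2]

theorem pv_crossS_be (w w2 : List Char) :
    (['b','e','_'] == w ++ '_' :: (w2 ++ ['_'])) = false := by
  have := pv_cross1 ['b','e'] w w2 (by decide)
  simpa only [List.cons_append, List.nil_append] using this

theorem pv_sws_ts (w r : List Char) (hw : '_' ∉ w) :
    PySem.Chars.startswith (w ++ '_' :: r) ['t','s','_'] = (['t','s','_'] == w ++ ['_']) := by
  have h1 := pv_sw_single ['t','s'] w r (by decide) hw
  have h2 := pv_beq_single ['t','s'] w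
  simp only [List.cons_append, List.nil_append] at h1 h2
  rw [h1, ← h2]

theorem pv_crossS_ts (w w2 : List Char) :
    (['t','s','_'] == w ++ '_' :: (w2 ++ ['_'])) = false := by
  have := pv_cross1 ['t','s'] w w2 (by decide)
  simpa only [List.cons_append, List.nil_append] using this

theorem pv_sws_ti (w r : List Char) (hw : '_' ∉ w) :
    PySem.Chars.startswith (w ++ '_' :: r) ['t','i','_'] = (['t','i','_'] == w ++ ['_']) := by
  have h1 := pv_sw_single ['t','i'] w r (by decide) hw
  have h2 := pv_beq_single ['t','i'] w
  simp only [List.cons_append, List.nil_append] at h1 h2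
  rw [h1, ← h2]

theorem pv_crossS_ti (w w2 : List Char) :
    (['t','i','_'] == w ++ '_' :: (w2 ++ ['_'])) = false := by
  have := pv_cross1 ['t','i'] w w2 (by decide)
  simpa only [List.cons_append, List.nil_append] using this

theorem pv_sws_tf (w r : List Char) (hw : '_' ∉ w) :
    PySem.Chars.startswith (w ++ '_' :: r) ['t','f','_'] = (['t','f','_'] == w ++ ['_']) := by
  have h1 := pv_sw_single ['t','f'] w r (by decide) hw
  have h2 := pv_beq_single ['t','f'] w
  simp only [List.cons_append, List.nil_append] at h1 h2
  rw [h1, ← h2]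

theorem pv_crossS_tf (w w2 : List Char) :
    (['t','f','_'] == w ++ '_' :: (w2 ++ ['_'])) = false := by
  have := pv_cross1 ['t','f'] w w2 (by decide)
  simpa only [List.cons_append, List.nil_append] using this

theorem pv_sws_nd (w r : List Char) (hw : '_' ∉ w) :
    PySem.Chars.startswith (w ++ '_' :: r) ['n','d','_'] = (['n','d','_'] == w ++ ['_']) := by
  have h1 := pv_sw_single ['n','d'] w r (by decide) hw
  have h2 := pv_beq_single ['n','d'] w
  simp only [List.cons_append, List.nil_append] at h1 h2
  rw [h1, ← h2]

theorem pv_crossS_nd (w w2 : List Char) :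
    (['n','d','_'] == w ++ '_' :: (w2 ++ ['_'])) = false := by
  have := pv_cross1 ['n','d'] w w2 (by decide)
  simpa only [List.cons_append, List.nil_append] using this

theorem pv_sws_dv (w r : List Char) (hw : '_' ∉ w) :
    PySem.Chars.startswith (w ++ '_' :: r) ['d','v','_'] = (['d','v','_'] == w ++ ['_']) := by
  have h1 := pv_sw_single ['d','v'] w r (by decide) hw
  have h2 := pv_beq_single ['d','v'] w
  simp only [List.cons_append, List.nil_append] at h1 h2
  rw [h1, ← h2]

theorem pv_crossS_dv (w w2 : List Char) :
    (['d','v','_'] == w ++ '_' :: (w2 ++ ['_'])) = false := by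
  have := pv_cross1 ['d','v'] w w2 (by decide)
  simpa only [List.cons_append, List.nil_append] using this

theorem pv_sws_ss (w r : List Char) (hw : '_' ∉ w) :
    PySem.Chars.startswith (w ++ '_' :: r) ['s','s','_'] = (['s','s','_'] == w ++ ['_']) := by
  have h1 := pv_sw_single ['s','s'] w r (by decide) hw
  have h2 := pv_beq_single ['s','s'] w
  simp only [List.cons_append, List.nil_append] at h1 h2
  rw [h1, ← h2]

theorem pv_crossS_ss (w w2 : List Char) :
    (['s','s','_'] == w ++ '_' :: (w2 ++ ['_'])) = false := by
  have := pv_cross1 ['s','s'] w w2 (by decide)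
  simpa only [List.cons_append, List.nil_append] using this

theorem pv_sws_ar (w r : List Char) (hw : '_' ∉ w) :
    PySem.Chars.startswith (w ++ '_' :: r) ['a','r','_'] = (['a','r','_'] == w ++ ['_']) := by
  have h1 := pv_sw_single ['a','r'] w r (by decide) hw
  have h2 := pv_beq_single ['a','r'] w
  simp only [List.cons_append, List.nil_append] at h1 h2
  rw [h1, ← h2]

theorem pv_crossS_ar (w w2 : List Char) :
    (['a','r','_'] == w ++ '_' :: (w2 ++ ['_'])) = false := by
  have := pv_cross1 ['a','r'] w w2 (by decide)
  simpa only [List.cons_append, List.nil_append] using this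

theorem pv_sws_techsvc (w r : List Char) (hw : '_' ∉ w) :
    PySem.Chars.startswith (w ++ '_' :: r) ['t','e','c','h','s','v','c','_'] = (['t','e','c','h','s','v','c','_'] == w ++ ['_']) := by
  have h1 := pv_sw_single ['t','e','c','h','s','v','c'] w r (by decide) hw
  have h2 := pv_beq_single ['t','e','c','h','s','v','c'] w
  simp only [List.cons_append, List.nil_append] at h1 h2
  rw [h1, ← h2]

theorem pv_crossS_techsvc (w w2 : List Char) :
    (['t','e','c','h','s','v','c','_'] == w ++ '_' :: (w2 ++ ['_'])) = false := by
  have := pv_cross1 ['t','e','c','h','s','v','c'] w w2 (by decide)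
  simpa only [List.cons_append, List.nil_append] using this

theorem pv_swd_bus_obj (w w2 r : List Char) (hw : '_' ∉ w) (hw2 : '_' ∉ w2) :
    PySem.Chars.startswith (w ++ '_' :: (w2 ++ '_' :: r)) ['b','u','s','_','o','b','j','_']
      = (['b','u','s','_','o','b','j','_'] == w ++ '_' :: (w2 ++ ['_'])) := by
  have h1 := pv_sw_double ['b','u','s'] (['o','b','j'] ++ ['_']) w (w2 ++ '_' :: r) (by decide) hw
  have h2 := pv_sw_single ['o','b','j'] w2 r (by decide) hw2
  have h3 := pv_beq_double ['b','u','s'] ['o','b','j'] w w2 (by decide) hw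
  simp only [List.cons_append, List.nil_append] at h1 h2 h3
  rw [h1, h2, ← h3]

theorem pv_swd2_bus_obj (w r : List Char) (hw : '_' ∉ w) (hr : '_' ∉ r) :
    PySem.Chars.startswith (w ++ '_' :: r) ['b','u','s','_','o','b','j','_'] = false := by
  have h1 := pv_sw_double ['b','u','s'] (['o','b','j'] ++ ['_']) w r (by decide) hw
  have h2 := pv_sw_no ['o','b','j'] r hr
  simp only [List.cons_append, List.nil_append] at h1 h2
  rw [h1, h2, Bool.and_false]

theorem pv_crossD_bus_obj (w : List Char) (hw : '_' ∉ w) :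
    (['b','u','s','_','o','b','j','_'] == w ++ ['_']) = false := by
  have := pv_cross2 ['b','u','s'] ['o','b','j'] w hw
  simpa only [List.cons_append, List.nil_append] using this

theorem pv_swd_bus_proc (w w2 r : List Char) (hw : '_' ∉ w) (hw2 : '_' ∉ w2) :
    PySem.Chars.startswith (w ++ '_' :: (w2 ++ '_' :: r)) ['b','u','s','_','p','r','o','c','_']
      = (['b','u','s','_','p','r','o','c','_'] == w ++ '_' :: (w2 ++ ['_'])) := by
  have h1 := pv_sw_double ['b','u','s'] (['p','r','o','c'] ++ ['_']) w (w2 ++ '_' :: r) (by decide) hw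
  have h2 := pv_sw_single ['p','r','o','c'] w2 r (by decide) hw2
  have h3 := pv_beq_double ['b','u','s'] ['p','r','o','c'] w w2 (by decide) hw
  simp only [List.cons_append, List.nil_append] at h1 h2 h3
  rw [h1, h2, ← h3]

theorem pv_swd2_bus_proc (w r : List Char) (hw : '_' ∉ w) (hr : '_' ∉ r) :
    PySem.Chars.startswith (w ++ '_' :: r) ['b','u','s','_','p','r','o','c','_'] = false := by
  have h1 := pv_sw_double ['b','u','s'] (['p','r','o','c'] ++ ['_']) w r (by decide) hw
  have h2 := pv_sw_no ['p','r','o','c'] r hr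
  simp only [List.cons_append, List.nil_append] at h1 h2
  rw [h1, h2, Bool.and_false]

theorem pv_crossD_bus_proc (w : List Char) (hw : '_' ∉ w) :
    (['b','u','s','_','p','r','o','c','_'] == w ++ ['_']) = false := by
  have := pv_cross2 ['b','u','s'] ['p','r','o','c'] w hw
  simpa only [List.cons_append, List.nil_append] using this

theorem pv_swd_app_comp (w w2 r : List Char) (hw : '_' ∉ w) (hw2 : '_' ∉ w2) :
    PySem.Chars.startswith (w ++ '_' :: (w2 ++ '_' :: r)) ['a','p','p','_','c','o','m','p','_']
      = (['a','p','p','_','c','o','m','p','_'] == w ++ '_' :: (w2 ++ ['_'])) := by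
  have h1 := pv_sw_double ['a','p','p'] (['c','o','m','p'] ++ ['_']) w (w2 ++ '_' :: r) (by decide) hw
  have h2 := pv_sw_single ['c','o','m','p'] w2 r (by decide) hw2
  have h3 := pv_beq_double ['a','p','p'] ['c','o','m','p'] w w2 (by decide) hw
  simp only [List.cons_append, List.nil_append] at h1 h2 h3
  rw [h1, h2, ← h3]

theorem pv_swd2_app_comp (w r : List Char) (hw : '_' ∉ w) (hr : '_' ∉ r) :
    PySem.Chars.startswith (w ++ '_' :: r) ['a','p','p','_','c','o','m','p','_'] = false := by
  have h1 := pv_sw_double ['a','p','p'] (['c','o','m','p'] ++ ['_']) w r (by decide) hw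
  have h2 := pv_sw_no ['c','o','m','p'] r hr
  simp only [List.cons_append, List.nil_append] at h1 h2
  rw [h1, h2, Bool.and_false]

theorem pv_crossD_app_comp (w : List Char) (hw : '_' ∉ w) :
    (['a','p','p','_','c','o','m','p','_'] == w ++ ['_']) = false := by
  have := pv_cross2 ['a','p','p'] ['c','o','m','p'] w hw
  simpa only [List.cons_append, List.nil_append] using this

theorem pv_swd_data_obj (w w2 r : List Char) (hw : '_' ∉ w) (hw2 : '_' ∉ w2) :
    PySem.Chars.startswith (w ++ '_' :: (w2 ++ '_' :: r)) ['d','a','t','a','_','o','b','j','_']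
      = (['d','a','t','a','_','o','b','j','_'] == w ++ '_' :: (w2 ++ ['_'])) := by
  have h1 := pv_sw_double ['d','a','t','a'] (['o','b','j'] ++ ['_']) w (w2 ++ '_' :: r) (by decide) hw
  have h2 := pv_sw_single ['o','b','j'] w2 r (by decide) hw2
  have h3 := pv_beq_double ['d','a','t','a'] ['o','b','j'] w w2 (by decide) hw
  simp only [List.cons_append, List.nil_append] at h1 h2 h3
  rw [h1, h2, ← h3]

theorem pv_swd2_data_obj (w r : List Char) (hw : '_' ∉ w) (hr : '_' ∉ r) :
    PySem.Chars.startswith (w ++ '_' :: r) ['d','a','t','a','_','o','b','j','_'] = false := by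
  have h1 := pv_sw_double ['d','a','t','a'] (['o','b','j'] ++ ['_']) w r (by decide) hw
  have h2 := pv_sw_no ['o','b','j'] r hr
  simp only [List.cons_append, List.nil_append] at h1 h2
  rw [h1, h2, Bool.and_false]

theorem pv_crossD_data_obj (w : List Char) (hw : '_' ∉ w) :
    (['d','a','t','a','_','o','b','j','_'] == w ++ ['_']) = false := by
  have := pv_cross2 ['d','a','t','a'] ['o','b','j'] w hw
  simpa only [List.cons_append, List.nil_append] using this


theorem pv_lowerChar_underscore : PySem.Chars.lowerChar '_' = '_' := rfl

theorem pvk_ac : ("ac_" : String).toList = ['a','c','_'] := rfl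
theorem pvk_ai : ("ai_" : String).toList = ['a','i','_'] := rfl
theorem pvk_as : ("as_" : String).toList = ['a','s','_'] := rfl
theorem pvk_af : ("af_" : String).toList = ['a','f','_'] := rfl
theorem pvk_ap : ("ap_" : String).toList = ['a','p','_'] := rfl
theorem pvk_do : ("do_" : String).toList = ['d','o','_'] := rfl
theorem pvk_ba : ("ba_" : String).toList = ['b','a','_'] := rfl
theorem pvk_br : ("br_" : String).toList = ['b','r','_'] := rfl
theorem pvk_bp : ("bp_" : String).toList = ['b','p','_'] := rfl
theorem pvk_bf : ("bf_" : String).toList = ['b','f','_'] := rfl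
theorem pvk_bs : ("bs_" : String).toList = ['b','s','_'] := rfl
theorem pvk_bo : ("bo_" : String).toList = ['b','o','_'] := rfl
theorem pvk_be : ("be_" : String).toList = ['b','e','_'] := rfl
theorem pvk_ts : ("ts_" : String).toList = ['t','s','_'] := rfl
theorem pvk_ti : ("ti_" : String).toList = ['t','i','_'] := rfl
theorem pvk_tf : ("tf_" : String).toList = ['t','f','_'] := rfl
theorem pvk_nd : ("nd_" : String).toList = ['n','d','_'] := rfl
theorem pvk_dv : ("dv_" : String).toList = ['d','v','_'] := rfl
theorem pvk_ss : ("ss_" : String).toList = ['s','s','_'] := rfl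
theorem pvk_ar : ("ar_" : String).toList = ['a','r','_'] := rfl
theorem pvk_techsvc : ("techsvc_" : String).toList = ['t','e','c','h','s','v','c','_'] := rfl
theorem pvk_bus_obj : ("bus_obj_" : String).toList = ['b','u','s','_','o','b','j','_'] := rfl
theorem pvk_bus_proc : ("bus_proc_" : String).toList = ['b','u','s','_','p','r','o','c','_'] := rfl
theorem pvk_app_comp : ("app_comp_" : String).toList = ['a','p','p','_','c','o','m','p','_'] := rfl
theorem pvk_data_obj : ("data_obj_" : String).toList = ['d','a','t','a','_','o','b','j','_'] := rfl

theorem pv_lower_nil : PySem.Chars.lower [] = [] := rfl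
theorem pv_get?_nil (x : String) : (PySem.Dict.mk ([] : List (String × String))).get? x = none := rfl
theorem pvle2 (n : Nat) : (2 ≤ n + 1 + 1) = True := by simp
theorem pvle : (2 ≤ 2) = True := by simp
theorem pvu : ("_" : String).toList = ['_'] := rfl
theorem pvtwo : (2 : Int).toNat = 2 := rfl

theorem pv_map_eq : pvPrefixMap = PySem.Dict.mk pvPrefixPairs := by
  apply PySem.Dict.ext
  exact pv_items_eq

set_option maxHeartbeats 1000000 in
theorem pv_main (s : String) : extract_element_type s = extract_element_type_alt s := by
  by_cases hmem : '_' ∈ s.toList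
  · obtain ⟨w, r, hcs, hw⟩ := pv_mem_decomp hmem
    have hlw : '_' ∉ PySem.Chars.lower w := fun h => hw ((pv_mem_lower _).mp h)
    by_cases hr : '_' ∈ r
    · obtain ⟨w2, r2, hr2, hw2⟩ := pv_mem_decomp hr
      subst hr2
      have hlw2 : '_' ∉ PySem.Chars.lower w2 := fun h => hw2 ((pv_mem_lower _).mp h)
      unfold extract_element_type extract_element_type_alt
      rw [pv_items_eq]
      simp only [pvPrefixPairs, pvScan, PySem.Str.startswith_eq, PySem.Str.toList_lower,
        PySem.Str.isIn_eq, pv_isIn_underscore, hcs, pv_lower_append, pv_lower_cons,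
        pv_lowerChar_underscore, pvk_ac, pvk_ai, pvk_as, pvk_af, pvk_ap, pvk_do, pvk_ba, pvk_br, pvk_bp, pvk_bf, pvk_bs, pvk_bo, pvk_be, pvk_ts, pvk_ti, pvk_tf, pvk_nd, pvk_dv, pvk_ss, pvk_ar, pvk_techsvc, pvk_bus_obj, pvk_bus_proc, pvk_app_comp, pvk_data_obj, pvu,
        pv_sws_ac, pv_sws_ai, pv_sws_as, pv_sws_af, pv_sws_ap, pv_sws_do, pv_sws_ba, pv_sws_br, pv_sws_bp, pv_sws_bf, pv_sws_bs, pv_sws_bo, pv_sws_be, pv_sws_ts, pv_sws_ti, pv_sws_tf, pv_sws_nd, pv_sws_dv, pv_sws_ss, pv_sws_ar, pv_sws_techsvc, pv_swd_bus_obj, pv_swd_bus_proc, pv_swd_app_comp, pv_swd_data_obj,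
        pv_split?_underscore, pv_sp_delim _ hw, pv_sp_delim _ hw2, pv_sp_delim _ hlw,
        pv_sp_delim _ hlw2,
        List.map_cons, List.map_nil, String.toList_ofList, String.toList_append,
        PySem.List.slice_to _ (by norm_num : (0 : Int) ≤ 2), pvtwo, List.take_succ_cons,
        List.take_zero, PySem.Str.toList_join, pv_join_pair, pv_map_eq, PySem.Dict.get?_mk_cons,
        pv_str_beq, pv_crossS_ac, pv_crossS_ai, pv_crossS_as, pv_crossS_af, pv_crossS_ap, pv_crossS_do, pv_crossS_ba, pv_crossS_br, pv_crossS_bp, pv_crossS_bf, pv_crossS_bs, pv_crossS_bo, pv_crossS_be, pv_crossS_ts, pv_crossS_ti, pv_crossS_tf, pv_crossS_nd, pv_crossS_dv, pv_crossS_ss, pv_crossS_ar, pv_crossS_techsvc, pv_crossD_bus_obj, pv_crossD_bus_proc, pv_crossD_app_comp, pv_crossD_data_obj,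
        hw, hr, hw2, hlw, hlw2, not_false_eq_true,
        pv_lower_nil, List.cons_append, List.nil_append, List.append_nil, List.append_assoc, List.singleton_append,
        Nat.reduceAdd, pvle, pvle2, if_true, List.mem_append, List.mem_cons, eq_self_iff_true,
        true_or, or_true, decide_true, List.length_map, List.length_cons, List.length_nil]
      by_cases g1 : (['a','c','_'] == PySem.Chars.lower w ++ ['_']) = true
      · simp only [g1, eq_self_iff_true, if_true, if_false, Bool.false_eq_true, List.length_cons, List.length_nil, Nat.reduceAdd, pvle, pvle2, pv_get?_nil]
      simp only [g1, eq_self_iff_true, if_true, if_false, Bool.false_eq_true, List.length_cons, List.length_nil, Nat.reduceAdd, pvle, pvle2, pv_get?_nil]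
      by_cases g2 : (['a','i','_'] == PySem.Chars.lower w ++ ['_']) = true
      · simp only [g2, eq_self_iff_true, if_true, if_false, Bool.false_eq_true, List.length_cons, List.length_nil, Nat.reduceAdd, pvle, pvle2, pv_get?_nil]
      simp only [g2, eq_self_iff_true, if_true, if_false, Bool.false_eq_true, List.length_cons, List.length_nil, Nat.reduceAdd, pvle, pvle2, pv_get?_nil]
      by_cases g3 : (['a','s','_'] == PySem.Chars.lower w ++ ['_']) = true
      · simp only [g3, eq_self_iff_true, if_true, if_false, Bool.false_eq_true, List.length_cons, List.length_nil, Nat.reduceAdd, pvle, pvle2, pv_get?_nil]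
      simp only [g3, eq_self_iff_true, if_true, if_false, Bool.false_eq_true, List.length_cons, List.length_nil, Nat.reduceAdd, pvle, pvle2, pv_get?_nil]
      by_cases g4 : (['a','f','_'] == PySem.Chars.lower w ++ ['_']) = true
      · simp only [g4, eq_self_iff_true, if_true, if_false, Bool.false_eq_true, List.length_cons, List.length_nil, Nat.reduceAdd, pvle, pvle2, pv_get?_nil]
      simp only [g4, eq_self_iff_true, if_true, if_false, Bool.false_eq_true, List.length_cons, List.length_nil, Nat.reduceAdd, pvle, pvle2, pv_get?_nil]
      by_cases g5 : (['a','p','_'] == PySem.Chars.lower w ++ ['_']) = true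
      · simp only [g5, eq_self_iff_true, if_true, if_false, Bool.false_eq_true, List.length_cons, List.length_nil, Nat.reduceAdd, pvle, pvle2, pv_get?_nil]
      simp only [g5, eq_self_iff_true, if_true, if_false, Bool.false_eq_true, List.length_cons, List.length_nil, Nat.reduceAdd, pvle, pvle2, pv_get?_nil]
      by_cases g6 : (['d','o','_'] == PySem.Chars.lower w ++ ['_']) = true
      · simp only [g6, eq_self_iff_true, if_true, if_false, Bool.false_eq_true, List.length_cons, List.length_nil, Nat.reduceAdd, pvle, pvle2, pv_get?_nil]
      simp only [g6, eq_self_iff_true, if_true, if_false, Bool.false_eq_true, List.length_cons, List.length_nil, Nat.reduceAdd, pvle, pvle2, pv_get?_nil]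
      by_cases g7 : (['b','a','_'] == PySem.Chars.lower w ++ ['_']) = true
      · simp only [g7, eq_self_iff_true, if_true, if_false, Bool.false_eq_true, List.length_cons, List.length_nil, Nat.reduceAdd, pvle, pvle2, pv_get?_nil]
      simp only [g7, eq_self_iff_true, if_true, if_false, Bool.false_eq_true, List.length_cons, List.length_nil, Nat.reduceAdd, pvle, pvle2, pv_get?_nil]
      by_cases g8 : (['b','r','_'] == PySem.Chars.lower w ++ ['_']) = true
      · simp only [g8, eq_self_iff_true, if_true, if_false, Bool.false_eq_true, List.length_cons, List.length_nil, Nat.reduceAdd, pvle, pvle2, pv_get?_nil]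
      simp only [g8, eq_self_iff_true, if_true, if_false, Bool.false_eq_true, List.length_cons, List.length_nil, Nat.reduceAdd, pvle, pvle2, pv_get?_nil]
      by_cases g9 : (['b','p','_'] == PySem.Chars.lower w ++ ['_']) = true
      · simp only [g9, eq_self_iff_true, if_true, if_false, Bool.false_eq_true, List.length_cons, List.length_nil, Nat.reduceAdd, pvle, pvle2, pv_get?_nil]
      simp only [g9, eq_self_iff_true, if_true, if_false, Bool.false_eq_true, List.length_cons, List.length_nil, Nat.reduceAdd, pvle, pvle2, pv_get?_nil]
      by_cases g10 : (['b','f','_'] == PySem.Chars.lower w ++ ['_']) = true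
      · simp only [g10, eq_self_iff_true, if_true, if_false, Bool.false_eq_true, List.length_cons, List.length_nil, Nat.reduceAdd, pvle, pvle2, pv_get?_nil]
      simp only [g10, eq_self_iff_true, if_true, if_false, Bool.false_eq_true, List.length_cons, List.length_nil, Nat.reduceAdd, pvle, pvle2, pv_get?_nil]
      by_cases g11 : (['b','s','_'] == PySem.Chars.lower w ++ ['_']) = true
      · simp only [g11, eq_self_iff_true, if_true, if_false, Bool.false_eq_true, List.length_cons, List.length_nil, Nat.reduceAdd, pvle, pvle2, pv_get?_nil]
      simp only [g11, eq_self_iff_true, if_true, if_false, Bool.false_eq_true, List.length_cons, List.length_nil, Nat.reduceAdd, pvle, pvle2, pv_get?_nil]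
      by_cases g12 : (['b','o','_'] == PySem.Chars.lower w ++ ['_']) = true
      · simp only [g12, eq_self_iff_true, if_true, if_false, Bool.false_eq_true, List.length_cons, List.length_nil, Nat.reduceAdd, pvle, pvle2, pv_get?_nil]
      simp only [g12, eq_self_iff_true, if_true, if_false, Bool.false_eq_true, List.length_cons, List.length_nil, Nat.reduceAdd, pvle, pvle2, pv_get?_nil]
      by_cases g13 : (['b','e','_'] == PySem.Chars.lower w ++ ['_']) = true
      · simp only [g13, eq_self_iff_true, if_true, if_false, Bool.false_eq_true, List.length_cons, List.length_nil, Nat.reduceAdd, pvle, pvle2, pv_get?_nil]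
      simp only [g13, eq_self_iff_true, if_true, if_false, Bool.false_eq_true, List.length_cons, List.length_nil, Nat.reduceAdd, pvle, pvle2, pv_get?_nil]
      by_cases g14 : (['t','s','_'] == PySem.Chars.lower w ++ ['_']) = true
      · simp only [g14, eq_self_iff_true, if_true, if_false, Bool.false_eq_true, List.length_cons, List.length_nil, Nat.reduceAdd, pvle, pvle2, pv_get?_nil]
      simp only [g14, eq_self_iff_true, if_true, if_false, Bool.false_eq_true, List.length_cons, List.length_nil, Nat.reduceAdd, pvle, pvle2, pv_get?_nil]
      by_cases g15 : (['t','i','_'] == PySem.Chars.lower w ++ ['_']) = true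
      · simp only [g15, eq_self_iff_true, if_true, if_false, Bool.false_eq_true, List.length_cons, List.length_nil, Nat.reduceAdd, pvle, pvle2, pv_get?_nil]
      simp only [g15, eq_self_iff_true, if_true, if_false, Bool.false_eq_true, List.length_cons, List.length_nil, Nat.reduceAdd, pvle, pvle2, pv_get?_nil]
      by_cases g16 : (['t','f','_'] == PySem.Chars.lower w ++ ['_']) = true
      · simp only [g16, eq_self_iff_true, if_true, if_false, Bool.false_eq_true, List.length_cons, List.length_nil, Nat.reduceAdd, pvle, pvle2, pv_get?_nil]
      simp only [g16, eq_self_iff_true, if_true, if_false, Bool.false_eq_true, List.length_cons, List.length_nil, Nat.reduceAdd, pvle, pvle2, pv_get?_nil]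
      by_cases g17 : (['n','d','_'] == PySem.Chars.lower w ++ ['_']) = true
      · simp only [g17, eq_self_iff_true, if_true, if_false, Bool.false_eq_true, List.length_cons, List.length_nil, Nat.reduceAdd, pvle, pvle2, pv_get?_nil]
      simp only [g17, eq_self_iff_true, if_true, if_false, Bool.false_eq_true, List.length_cons, List.length_nil, Nat.reduceAdd, pvle, pvle2, pv_get?_nil]
      by_cases g18 : (['d','v','_'] == PySem.Chars.lower w ++ ['_']) = true
      · simp only [g18, eq_self_iff_true, if_true, if_false, Bool.false_eq_true, List.length_cons, List.length_nil, Nat.reduceAdd, pvle, pvle2, pv_get?_nil]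
      simp only [g18, eq_self_iff_true, if_true, if_false, Bool.false_eq_true, List.length_cons, List.length_nil, Nat.reduceAdd, pvle, pvle2, pv_get?_nil]
      by_cases g19 : (['s','s','_'] == PySem.Chars.lower w ++ ['_']) = true
      · simp only [g19, eq_self_iff_true, if_true, if_false, Bool.false_eq_true, List.length_cons, List.length_nil, Nat.reduceAdd, pvle, pvle2, pv_get?_nil]
      simp only [g19, eq_self_iff_true, if_true, if_false, Bool.false_eq_true, List.length_cons, List.length_nil, Nat.reduceAdd, pvle, pvle2, pv_get?_nil]
      by_cases g20 : (['a','r','_'] == PySem.Chars.lower w ++ ['_']) = true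
      · simp only [g20, eq_self_iff_true, if_true, if_false, Bool.false_eq_true, List.length_cons, List.length_nil, Nat.reduceAdd, pvle, pvle2, pv_get?_nil]
      simp only [g20, eq_self_iff_true, if_true, if_false, Bool.false_eq_true, List.length_cons, List.length_nil, Nat.reduceAdd, pvle, pvle2, pv_get?_nil]
      by_cases g21 : (['t','e','c','h','s','v','c','_'] == PySem.Chars.lower w ++ ['_']) = true
      · simp only [g21, eq_self_iff_true, if_true, if_false, Bool.false_eq_true, List.length_cons, List.length_nil, Nat.reduceAdd, pvle, pvle2, pv_get?_nil]
      simp only [g21, eq_self_iff_true, if_true, if_false, Bool.false_eq_true, List.length_cons, List.length_nil, Nat.reduceAdd, pvle, pvle2, pv_get?_nil]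
      by_cases g22 : (['b','u','s','_','o','b','j','_'] == PySem.Chars.lower w ++ '_' :: (PySem.Chars.lower w2 ++ ['_'])) = true
      · simp only [g22, eq_self_iff_true, if_true, if_false, Bool.false_eq_true, List.length_cons, List.length_nil, Nat.reduceAdd, pvle, pvle2, pv_get?_nil]
      simp only [g22, eq_self_iff_true, if_true, if_false, Bool.false_eq_true, List.length_cons, List.length_nil, Nat.reduceAdd, pvle, pvle2, pv_get?_nil]
      by_cases g23 : (['b','u','s','_','p','r','o','c','_'] == PySem.Chars.lower w ++ '_' :: (PySem.Chars.lower w2 ++ ['_'])) = true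
      · simp only [g23, eq_self_iff_true, if_true, if_false, Bool.false_eq_true, List.length_cons, List.length_nil, Nat.reduceAdd, pvle, pvle2, pv_get?_nil]
      simp only [g23, eq_self_iff_true, if_true, if_false, Bool.false_eq_true, List.length_cons, List.length_nil, Nat.reduceAdd, pvle, pvle2, pv_get?_nil]
      by_cases g24 : (['a','p','p','_','c','o','m','p','_'] == PySem.Chars.lower w ++ '_' :: (PySem.Chars.lower w2 ++ ['_'])) = true
      · simp only [g24, eq_self_iff_true, if_true, if_false, Bool.false_eq_true, List.length_cons, List.length_nil, Nat.reduceAdd, pvle, pvle2, pv_get?_nil]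
      simp only [g24, eq_self_iff_true, if_true, if_false, Bool.false_eq_true, List.length_cons, List.length_nil, Nat.reduceAdd, pvle, pvle2, pv_get?_nil]
      by_cases g25 : (['d','a','t','a','_','o','b','j','_'] == PySem.Chars.lower w ++ '_' :: (PySem.Chars.lower w2 ++ ['_'])) = true
      · simp only [g25, eq_self_iff_true, if_true, if_false, Bool.false_eq_true, List.length_cons, List.length_nil, Nat.reduceAdd, pvle, pvle2, pv_get?_nil]
      simp only [g25, eq_self_iff_true, if_true, if_false, Bool.false_eq_true, List.length_cons, List.length_nil, Nat.reduceAdd, pvle, pvle2, pv_get?_nil]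
    · have hlr : '_' ∉ PySem.Chars.lower r := fun h => hr ((pv_mem_lower _).mp h)
      unfold extract_element_type extract_element_type_alt
      rw [pv_items_eq]
      simp only [pvPrefixPairs, pvScan, PySem.Str.startswith_eq, PySem.Str.toList_lower,
        PySem.Str.isIn_eq, pv_isIn_underscore, hcs, pv_lower_append, pv_lower_cons,
        pv_lowerChar_underscore, pvk_ac, pvk_ai, pvk_as, pvk_af, pvk_ap, pvk_do, pvk_ba, pvk_br, pvk_bp, pvk_bf, pvk_bs, pvk_bo, pvk_be, pvk_ts, pvk_ti, pvk_tf, pvk_nd, pvk_dv, pvk_ss, pvk_ar, pvk_techsvc, pvk_bus_obj, pvk_bus_proc, pvk_app_comp, pvk_data_obj, pvu,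
        pv_sws_ac, pv_sws_ai, pv_sws_as, pv_sws_af, pv_sws_ap, pv_sws_do, pv_sws_ba, pv_sws_br, pv_sws_bp, pv_sws_bf, pv_sws_bs, pv_sws_bo, pv_sws_be, pv_sws_ts, pv_sws_ti, pv_sws_tf, pv_sws_nd, pv_sws_dv, pv_sws_ss, pv_sws_ar, pv_sws_techsvc, pv_swd2_bus_obj, pv_swd2_bus_proc, pv_swd2_app_comp, pv_swd2_data_obj,
        pv_split?_underscore, pv_sp_delim _ hw, pv_sp_delim _ hlw, pv_sp_no hr, pv_sp_no hlr,
        List.map_cons, List.map_nil, String.toList_ofList, String.toList_append,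
        PySem.List.slice_to _ (by norm_num : (0:Int) ≤ 2), pvtwo, List.take_succ_cons, List.take_zero,
        PySem.Str.toList_join, pv_join_pair, pv_map_eq, PySem.Dict.get?_mk_cons, pv_str_beq,
        pv_crossS_ac, pv_crossS_ai, pv_crossS_as, pv_crossS_af, pv_crossS_ap, pv_crossS_do, pv_crossS_ba, pv_crossS_br, pv_crossS_bp, pv_crossS_bf, pv_crossS_bs, pv_crossS_bo, pv_crossS_be, pv_crossS_ts, pv_crossS_ti, pv_crossS_tf, pv_crossS_nd, pv_crossS_dv, pv_crossS_ss, pv_crossS_ar, pv_crossS_techsvc, pv_crossD_bus_obj, pv_crossD_bus_proc, pv_crossD_app_comp, pv_crossD_data_obj,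
        hw, hr, hlw, hlr, not_false_eq_true,
        pv_lower_nil, List.cons_append, List.nil_append, List.append_nil, List.append_assoc, List.singleton_append,
        Nat.reduceAdd, pvle, if_true, List.mem_append, List.mem_cons, eq_self_iff_true,
        true_or, or_true, decide_true]
      by_cases h1 : (['a','c','_'] == PySem.Chars.lower w ++ ['_']) = true
      · simp only [h1, eq_self_iff_true, if_true, if_false, Bool.false_eq_true, List.length_cons, List.length_nil, Nat.reduceAdd, pvle, pv_get?_nil]
      simp only [h1, eq_self_iff_true, if_true, if_false, Bool.false_eq_true, List.length_cons, List.length_nil, Nat.reduceAdd, pvle, pv_get?_nil]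
  · have hml : '_' ∉ PySem.Chars.lower s.toList := fun h => hmem ((pv_mem_lower _).mp h)
    unfold extract_element_type extract_element_type_alt
    rw [pv_items_eq]
    simp only [pvPrefixPairs, pvScan, PySem.Str.startswith_eq, PySem.Str.toList_lower,
      PySem.Str.isIn_eq, pv_isIn_underscore, pvk_ac, pvk_ai, pvk_as, pvk_af, pvk_ap, pvk_do, pvk_ba, pvk_br, pvk_bp, pvk_bf, pvk_bs, pvk_bo, pvk_be, pvk_ts, pvk_ti, pvk_tf, pvk_nd, pvk_dv, pvk_ss, pvk_ar, pvk_techsvc, pvk_bus_obj, pvk_bus_proc, pvk_app_comp, pvk_data_obj]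
    simp only [pv_swno ['a','c','_'] _ hml (by decide),
      pv_swno ['a','i','_'] _ hml (by decide),
      pv_swno ['a','s','_'] _ hml (by decide),
      pv_swno ['a','f','_'] _ hml (by decide),
      pv_swno ['a','p','_'] _ hml (by decide),
      pv_swno ['d','o','_'] _ hml (by decide),
      pv_swno ['b','a','_'] _ hml (by decide),
      pv_swno ['b','r','_'] _ hml (by decide),
      pv_swno ['b','p','_'] _ hml (by decide),
      pv_swno ['b','f','_'] _ hml (by decide),
      pv_swno ['b','s','_'] _ hml (by decide),
      pv_swno ['b','o','_'] _ hml (by decide),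
      pv_swno ['b','e','_'] _ hml (by decide),
      pv_swno ['t','s','_'] _ hml (by decide),
      pv_swno ['t','i','_'] _ hml (by decide),
      pv_swno ['t','f','_'] _ hml (by decide),
      pv_swno ['n','d','_'] _ hml (by decide),
      pv_swno ['d','v','_'] _ hml (by decide),
      pv_swno ['s','s','_'] _ hml (by decide),
      pv_swno ['a','r','_'] _ hml (by decide),
      pv_swno ['t','e','c','h','s','v','c','_'] _ hml (by decide),
      pv_swno ['b','u','s','_','o','b','j','_'] _ hml (by decide),
      pv_swno ['b','u','s','_','p','r','o','c','_'] _ hml (by decide),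
      pv_swno ['a','p','p','_','c','o','m','p','_'] _ hml (by decide),
      pv_swno ['d','a','t','a','_','o','b','j','_'] _ hml (by decide)]
    simp [pv_isIn_underscore, pv_mem_lower, hmem]

-- ===== VERDICT (by name: the statement is the Claim_ definition above) =====
theorem extract_element_type_spec : Claim_equal_extract_element_type := by
  intro s _
  unfold Spec_extract_element_type
  exact pv_main s
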